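-- pv_equiv track=rewrite | github.com/kryntzz/FP | Projeto_1/Projeto_1.py | marca_posicao_aux
-- ===== SOURCE A (Python) =====
-- def linha(tab,pos):
--     """
--     Devolve a linha onde se encontra a pos
--
--     linha:tab,pos-->int
--     """
--     return (pos-1)//(len(tab[0]))
--
-- def coluna(tab,pos):
--     """
--     Devolve o indice da coluna de pos
--
--     coluna:tab,pos-->int
--     """
--     return (pos-1)%(len(tab[0]))
--
-- def marca_posicao_aux(tab,pos,jg):
--     """
--     Recebe um tabuleiro, uma posição livre do tabuleiro e um
--     inteiro identificando um jogador, e devolve um novo tabuleiro com uma nova pedra do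
--     jogador indicado nessa posição.
--
--     marca_posicao:tab,pos,int -->tab
--     """
--     tab_f,res,l,c=(),(),linha(tab,pos),coluna(tab,pos)
--     for i in range(len(tab[0])):
--         if i==c:
--             res+=(jg,)
--         else:
--             res+=(tab[l][i],)
--     return tab[:l] + (res,)+tab[l+1:]
-- ===== SOURCE B (Python) =====
-- def marca_posicao_aux(tab, pos, jg):
--     l, c = divmod(pos - 1, len(tab[0]))
--     row = list(tab[l])
--     row[c] = jg
--     return tab[:l] + (tuple(row),) + tab[l + 1:]
-- ===== Notes on version B (the rewrite author's own statement) =====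
-- stated objective: idiomatic
-- what changed: B replaces A's per-column rebuild loop (appending jg or tab[l][i] under an if i==c over range(len(tab[0]))) by copying row l once with list(), assigning the single cell c, and computing l,c with one divmod.
-- outside the precondition, e.g. on marca_posicao_aux(((1, 2), (3, 4, 5)), 3, 9): A returns ((1, 2), (9, 4)), B returns ((1, 2), (9, 4, 5)); on marca_posicao_aux(((5,),), 3, 1): A returns ((5,), (1,)), B raises IndexError
import Mathlib
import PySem

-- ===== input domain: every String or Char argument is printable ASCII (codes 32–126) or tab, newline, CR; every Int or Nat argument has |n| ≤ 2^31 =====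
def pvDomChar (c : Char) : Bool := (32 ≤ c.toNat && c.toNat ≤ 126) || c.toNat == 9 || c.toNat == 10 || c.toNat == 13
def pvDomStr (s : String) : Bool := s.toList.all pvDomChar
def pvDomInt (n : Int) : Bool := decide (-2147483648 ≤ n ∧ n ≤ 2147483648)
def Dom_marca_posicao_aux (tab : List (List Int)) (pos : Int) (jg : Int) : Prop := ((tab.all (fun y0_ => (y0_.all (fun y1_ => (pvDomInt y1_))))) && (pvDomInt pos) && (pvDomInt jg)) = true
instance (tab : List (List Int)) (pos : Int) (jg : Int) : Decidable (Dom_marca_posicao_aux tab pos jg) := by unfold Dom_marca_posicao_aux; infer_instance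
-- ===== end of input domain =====

-- ===== PORT A =====
-- One honest line: B replaces A's per-column rebuild loop (if i==c branch over range(len(tab[0])))
-- by copying row l once and setting the single cell c (idiomatic; same O(w) cost).
-- helpers linha / coluna of the Python module
def linha_py (tab : List (List Int)) (pos : Int) : Int :=
  PySem.Int.floordiv (pos - 1) (((PySem.List.pyGet? tab 0).getD []).length : Int)

def coluna_py (tab : List (List Int)) (pos : Int) : Int :=
  PySem.Int.mod (pos - 1) (((PySem.List.pyGet? tab 0).getD []).length : Int)

def marca_posicao_aux (tab : List (List Int)) (pos : Int) (jg : Int) : List (List Int) :=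
  let l := linha_py tab pos
  let c := coluna_py tab pos
  -- for i in range(len(tab[0])): if i==c: res+=(jg,) else: res+=(tab[l][i],)
  -- tab[l][i] is in range on every input Pre_ admits; pyGetD's default is never read there
  let res := (PySem.List.pyRange 0 (((PySem.List.pyGet? tab 0).getD []).length : Int) 1).foldl
      (fun acc i => if i == c then acc ++ [jg]
                    else acc ++ [PySem.List.pyGetD ((PySem.List.pyGet? tab l).getD []) i 0]) []
  PySem.List.slice tab none (some l) ++ [res] ++ PySem.List.slice tab (some (l + 1)) none

-- ===== PORT B =====
def marca_posicao_aux_alt (tab : List (List Int)) (pos : Int) (jg : Int) : List (List Int) :=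
  let w : Int := ((PySem.List.pyGet? tab 0).getD []).length
  let l := PySem.Int.floordiv (pos - 1) w
  let c := PySem.Int.mod (pos - 1) w
  let row := (PySem.List.pyGet? tab l).getD []
  -- row[c] = jg : exact for 0 <= c < row.length, which Pre_ guarantees (List.set is a no-op past the end)
  let row' := row.set c.toNat jg
  PySem.List.slice tab none (some l) ++ [row'] ++ PySem.List.slice tab (some (l + 1)) none

-- ===== PRECONDITION & SPEC =====
-- Pre_ excludes the inputs where A raises (empty/zero-width board, row l reached out of range by a
-- board of width >= 2, a too-short row l), and in addition two kinds of inputs on which A still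
-- returns an accidental value that B's natural algorithm cannot match: boards whose row l is longer
-- than row 0 (A truncates row l to len(tab[0]) where B copies row l itself) and off-board positions
-- on one-column boards (A never touches tab[l] there and the clamped slices append/prepend a phantom
-- row, while B raises an IndexError reading tab[l]).
def Pre_marca_posicao_aux (tab : List (List Int)) (pos : Int) (jg : Int) : Prop :=
  tab ≠ [] ∧ 0 < (tab.headD []).length ∧
    -(tab.length : Int) ≤ PySem.Int.floordiv (pos - 1) ((tab.headD []).length : Int) ∧
    PySem.Int.floordiv (pos - 1) ((tab.headD []).length : Int) < (tab.length : Int) ∧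
    ((PySem.List.pyGet? tab (PySem.Int.floordiv (pos - 1) ((tab.headD []).length : Int))).getD []).length
      = (tab.headD []).length

instance (tab : List (List Int)) (pos : Int) (jg : Int) : Decidable (Pre_marca_posicao_aux tab pos jg) := by
  unfold Pre_marca_posicao_aux; infer_instance

def pvWitness_marca_posicao_aux : List (List Int) × Int × Int := ([[1, 2], [3, 4]], 3, 9)

def Spec_marca_posicao_aux (tab : List (List Int)) (pos : Int) (jg : Int) (out : List (List Int)) : Prop := out = marca_posicao_aux_alt tab pos jg
instance (tab : List (List Int)) (pos : Int) (jg : Int) (out : List (List Int)) : Decidable (Spec_marca_posicao_aux tab pos jg out) := by unfold Spec_marca_posicao_aux; infer_instance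

-- ===== CLAIM (what is proved, stated in full; the proofs are below) =====
def Claim_equal_marca_posicao_aux : Prop := ∀ (tab : List (List Int)) (pos : Int) (jg : Int), Dom_marca_posicao_aux tab pos jg → Pre_marca_posicao_aux tab pos jg → Spec_marca_posicao_aux tab pos jg (marca_posicao_aux tab pos jg)

-- ===== LEMMAS AND PROOFS =====

-- A's rebuilt row, as a map over the column range, equals row l with cell c overwritten
lemma map_pyRange_eq_set (row : List Int) (c jg : Int) (h0 : 0 ≤ c) :
    (PySem.List.pyRange 0 (row.length : Int) 1).map
        (fun i => if i == c then jg else PySem.List.pyGetD row i 0)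
      = row.set c.toNat jg := by
  apply List.ext_getElem?
  intro k
  by_cases hk : k < row.length
  · rw [PySem.List.getElem?_map_pyRange_zero _ row.length k hk]
    by_cases hkc : (k : Int) = c
    · have hck : c.toNat = k := by omega
      simp [hkc, hck, hk]
    · have h1 : ((k : Int) == c) = false := by simpa using hkc
      have h2 : c.toNat ≠ k := by omega
      simp [h1, h2, hk, PySem.List.pyGetD_natCast, List.getD_eq_getElem?_getD]
  · have hlen : ((PySem.List.pyRange 0 (row.length : Int) 1).map
        (fun i => if i == c then jg else PySem.List.pyGetD row i 0)).length = row.length := by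
      simp [PySem.List.length_pyRange_one]
    rw [List.getElem?_eq_none (by omega), List.getElem?_eq_none (by simp [List.length_set]; omega)]

-- ===== VERDICT (by name: the statement is the Claim_ definition above) =====
theorem marca_posicao_aux_spec : Claim_equal_marca_posicao_aux := by
  intro tab pos jg _ hpre
  obtain ⟨hne, hw, hlo, hhi, hrowl⟩ := hpre
  unfold Spec_marca_posicao_aux marca_posicao_aux marca_posicao_aux_alt linha_py coluna_py
  obtain ⟨r0, rest, rfl⟩ : ∃ r0 rest, tab = r0 :: rest := by
    cases tab with
    | nil => exact absurd rfl hne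
    | cons a l => exact ⟨a, l, rfl⟩
  simp only [List.headD_cons] at hw hlo hhi hrowl
  have h0 : PySem.List.pyGet? (r0 :: rest) 0 = some r0 := PySem.List.pyGet?_zero_cons r0 rest
  rw [h0]
  simp only [Option.getD_some]
  have hwpos : (0 : Int) < (r0.length : Int) := by exact_mod_cast hw
  have hin : PySem.Raise.InRange (r0 :: rest).length (PySem.Int.floordiv (pos - 1) (r0.length : Int)) := by
    simp only [PySem.Raise.InRange]; omega
  obtain ⟨row, hrow⟩ : ∃ row,
      PySem.List.pyGet? (r0 :: rest) (PySem.Int.floordiv (pos - 1) (r0.length : Int)) = some row := by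
    cases hg : PySem.List.pyGet? (r0 :: rest) (PySem.Int.floordiv (pos - 1) (r0.length : Int)) with
    | none => exact absurd ((PySem.List.pyGet?_eq_none_iff _ _).mp hg) (not_not_intro hin)
    | some r => exact ⟨r, rfl⟩
  rw [hrow]
  simp only [Option.getD_some]
  congr 2
  -- the loop body appends one element either way; fold = map, then map_pyRange_eq_set
  have hstep : (fun (acc : List Int) (i : Int) =>
        if i == PySem.Int.mod (pos - 1) (r0.length : Int) then acc ++ [jg]
        else acc ++ [PySem.List.pyGetD row i 0])
      = (fun (acc : List Int) (i : Int) =>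
        acc ++ [if i == PySem.Int.mod (pos - 1) (r0.length : Int) then jg
                else PySem.List.pyGetD row i 0]) := by
    funext acc i
    by_cases h : (i == PySem.Int.mod (pos - 1) (r0.length : Int)) = true <;> simp [h]
  rw [hstep, PySem.List.foldl_append_singleton_eq_map, List.nil_append]
  have hrowlen : row.length = r0.length := by rw [hrow] at hrowl; simpa using hrowl
  have hcast : (row.length : Int) = (r0.length : Int) := by exact_mod_cast hrowlen
  have hmain := map_pyRange_eq_set row (PySem.Int.mod (pos - 1) (r0.length : Int)) jg
    (PySem.Int.mod_nonneg _ hwpos)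
  rw [hcast] at hmain
  rw [hmain]
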